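-- pv_equiv track=rewrite | github.com/trento-project/trento | runner/ansible/support/id_checker.py | id_sanity_check
-- ===== SOURCE A (Python) =====
-- HEXDIGITS = "0123456789ABCDEF"
--
-- ID_LENGTH = 6
--
-- def id_sanity_check(check_id):
--     """
--     Check ID syntax sanity check
--     """
--     str_check_id = str(check_id)
--     if len(str_check_id) != ID_LENGTH:
--         return False
--
--     for char in str_check_id:
--         if char not in HEXDIGITS:
--             return False
--
--     return True
-- ===== SOURCE B (Python) =====
-- import re
--
-- _ID_RE = re.compile(r"[0-9A-F]{6}")
--
-- def id_sanity_check(check_id):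
--     """
--     Check ID syntax sanity check
--     """
--     return _ID_RE.fullmatch(str(check_id)) is not None
-- ===== Notes on version B (the rewrite author's own statement) =====
-- stated objective: idiomatic
-- what changed: Replaces the explicit length guard and per-character early-return membership loop with a single anchored regex fullmatch against [0-9A-F]{6}, which encodes both the length and the character class.
import Mathlib
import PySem

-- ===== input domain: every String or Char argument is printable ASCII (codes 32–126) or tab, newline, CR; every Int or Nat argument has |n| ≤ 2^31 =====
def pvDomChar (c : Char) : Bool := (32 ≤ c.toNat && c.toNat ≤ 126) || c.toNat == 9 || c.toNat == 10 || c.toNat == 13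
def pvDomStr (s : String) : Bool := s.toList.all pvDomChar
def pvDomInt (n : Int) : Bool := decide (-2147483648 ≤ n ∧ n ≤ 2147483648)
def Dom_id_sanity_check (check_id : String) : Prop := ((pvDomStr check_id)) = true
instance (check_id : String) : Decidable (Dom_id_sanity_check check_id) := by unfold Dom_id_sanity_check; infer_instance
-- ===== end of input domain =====

-- B replaces A's length guard + per-character early-return loop by a single anchored
-- regex fullmatch [0-9A-F]{6} (ported as one length-and-character-class test); idiomatic, same cost.

-- ===== PORT A =====
-- HEXDIGITS = "0123456789ABCDEF" (membership of a single char in this string = list membership; exact)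
def pvHexDigits : List Char := "0123456789ABCDEF".toList

-- the for-loop with early return False
def pvLoopA : List Char → Bool
  | [] => true
  | c :: rest => if pvHexDigits.contains c then pvLoopA rest else false

def id_sanity_check (check_id : String) : Bool :=
  -- str(check_id) on a str is the identity
  let cs := check_id.toList
  if cs.length ≠ 6 then false
  else pvLoopA cs

-- ===== PORT B =====
-- re.fullmatch(r"[0-9A-F]{6}", s) is not None: the anchored regex matches iff the string
-- has exactly 6 chars, each in the class [0-9A-F]; ported as that semantics directly.
def id_sanity_check_alt (check_id : String) : Bool :=
  let cs := check_id.toList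
  cs.length == 6 && cs.all (fun c => ('0' ≤ c && c ≤ '9') || ('A' ≤ c && c ≤ 'F'))

-- ===== PRECONDITION & SPEC =====
def Spec_id_sanity_check (check_id : String) (out : Bool) : Prop := out = id_sanity_check_alt check_id
instance (check_id : String) (out : Bool) : Decidable (Spec_id_sanity_check check_id out) := by unfold Spec_id_sanity_check; infer_instance

-- ===== CLAIM (what is proved, stated in full; the proofs are below) =====
def Claim_equal_id_sanity_check : Prop := ∀ (check_id : String), Dom_id_sanity_check check_id → Spec_id_sanity_check check_id (id_sanity_check check_id)

-- ===== LEMMAS AND PROOFS =====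

theorem char_eq_iff_toNat (c d : Char) : c = d ↔ c.toNat = d.toNat :=
  ⟨fun h => h ▸ rfl, fun h => Char.ext (UInt32.toNat_inj.mp h)⟩

theorem pvHexChar (c : Char) :
    pvHexDigits.contains c = (('0' ≤ c && c ≤ '9') || ('A' ≤ c && c ≤ 'F')) := by
  have hl : pvHexDigits = ['0','1','2','3','4','5','6','7','8','9','A','B','C','D','E','F'] := by
    decide
  rw [Bool.eq_iff_iff, hl]
  simp only [List.contains_eq_mem, List.mem_cons, List.not_mem_nil, or_false,
    decide_eq_true_eq, Bool.or_eq_true, Bool.and_eq_true, Char.le_def,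
    UInt32.le_iff_toNat_le, char_eq_iff_toNat, Char.toNat]
  have hv : ('0':Char).val.toNat = 48 ∧ ('1':Char).val.toNat = 49 ∧ ('2':Char).val.toNat = 50 ∧ ('3':Char).val.toNat = 51 ∧ ('4':Char).val.toNat = 52 ∧ ('5':Char).val.toNat = 53 ∧ ('6':Char).val.toNat = 54 ∧ ('7':Char).val.toNat = 55 ∧ ('8':Char).val.toNat = 56 ∧ ('9':Char).val.toNat = 57 ∧ ('A':Char).val.toNat = 65 ∧ ('B':Char).val.toNat = 66 ∧ ('C':Char).val.toNat = 67 ∧ ('D':Char).val.toNat = 68 ∧ ('E':Char).val.toNat = 69 ∧ ('F':Char).val.toNat = 70 := by decide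
  obtain ⟨h1,h2,h3,h4,h5,h6,h7,h8,h9,h10,h11,h12,h13,h14,h15,h16⟩ := hv
  omega

theorem pvLoopA_eq_all (cs : List Char) :
    pvLoopA cs = cs.all (fun c => ('0' ≤ c && c ≤ '9') || ('A' ≤ c && c ≤ 'F')) := by
  induction cs with
  | nil => rfl
  | cons c rest ih =>
    rw [show pvLoopA (c :: rest) = if pvHexDigits.contains c then pvLoopA rest else false from
      rfl, List.all_cons, ih, pvHexChar c]
    cases ('0' ≤ c && c ≤ '9') || ('A' ≤ c && c ≤ 'F') <;> simp

-- ===== VERDICT (by name: the statement is the Claim_ definition above) =====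
theorem id_sanity_check_spec : Claim_equal_id_sanity_check := by
  intro check_id _
  unfold Spec_id_sanity_check id_sanity_check id_sanity_check_alt
  simp only
  rw [pvLoopA_eq_all]
  by_cases h : check_id.toList.length = 6 <;> simp [h, beq_eq_decide]
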